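-- pv_equiv track=rewrite | github.com/mruckman1/voynich | data/latin_syllables.py | _find_vowel_positions
-- ===== SOURCE A (Python) =====
-- from typing import Dict, List, Tuple, Optional
--
-- _VOWELS = set('aeiou')
--
-- _DIPHTHONGS = ['ae', 'oe', 'au', 'eu']
--
-- def _find_vowel_positions(word: str) -> List[Tuple[int, int]]:
--     """Find (start, end) positions of all vowel nuclei including diphthongs."""
--     positions = []
--     i = 0
--     while i < len(word):
--         if word[i] in _VOWELS or word[i] == 'Q':
--             start = i
--             # Check for diphthong
--             if i + 1 < len(word) and word[i:i+2].replace('Q', 'qu') in _DIPHTHONGS: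
--                 i += 2
--             else:
--                 i += 1
--             positions.append((start, i))
--         else:
--             i += 1
--     return positions
-- ===== SOURCE B (Python) =====
-- import re
-- from typing import List, Tuple
--
-- # Nucleus grammar as a regex: diphthongs first so they win over single vowels;
-- # 'Q' is a literal nucleus. The A-side replace('Q','qu') can never produce a
-- # diphthong (it yields a 3-char string), so diphthongs are exactly these four.
-- _NUCLEUS_RE = re.compile(r'ae|oe|au|eu|[aeiou]|Q')
--
-- def _find_vowel_positions(word: str) -> List[Tuple[int, int]]:
--     return [(m.start(), m.end()) for m in _NUCLEUS_RE.finditer(word)]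
-- ===== Notes on version B (the rewrite author's own statement) =====
-- stated objective: faster
-- what changed: Replaced the hand-rolled index/while loop with per-character set membership, slicing and a replace-based diphthong lookup by a single precompiled regex (diphthongs first, then single vowels, then the literal uppercase nucleus marker) whose non-overlapping finditer scan yields the (start,end) spans directly.
import Mathlib
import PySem

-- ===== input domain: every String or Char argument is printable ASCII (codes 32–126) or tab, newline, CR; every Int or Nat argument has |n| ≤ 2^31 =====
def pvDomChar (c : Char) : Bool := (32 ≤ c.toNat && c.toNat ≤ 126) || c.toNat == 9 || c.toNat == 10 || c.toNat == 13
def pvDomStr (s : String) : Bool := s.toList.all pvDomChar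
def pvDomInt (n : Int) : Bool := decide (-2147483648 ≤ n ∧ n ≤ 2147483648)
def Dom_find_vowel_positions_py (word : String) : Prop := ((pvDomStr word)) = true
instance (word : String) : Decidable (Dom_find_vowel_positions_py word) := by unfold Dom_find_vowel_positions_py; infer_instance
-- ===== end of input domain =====

-- B replaces A's index/while loop (set membership + slice + replace('Q','qu') lookup) by a
-- regex-style left-to-right scan trying the nucleus alternatives ae|oe|au|eu|[aeiou]|Q in order.


-- ===== PORT A =====
def pvVOWELS : PySem.Set Char := PySem.Set.ofList ['a', 'e', 'i', 'o', 'u']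

def pvDIPHTHONGS : List (List Char) := [['a', 'e'], ['o', 'e'], ['a', 'u'], ['e', 'u']]

-- A's while loop, index i over the remaining suffix; word[i] is the head c,
-- 'i + 1 < len(word)' is 'rest ≠ []', and the slice word[i:i+2] is (c :: rest).take 2.
def fvpA_go (l : List Char) (i : Int) : List (Int × Int) :=
  match l with
  | [] => []
  | c :: rest =>
    if c ∈ pvVOWELS ∨ c = 'Q' then
      if rest ≠ [] ∧ PySem.Chars.replace ((c :: rest).take 2) ['Q'] ['q', 'u'] ∈ pvDIPHTHONGS then
        (i, i + 2) :: fvpA_go rest.tail (i + 2)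
      else
        (i, i + 1) :: fvpA_go rest (i + 1)
    else fvpA_go rest (i + 1)
termination_by l.length
decreasing_by all_goals simp [List.length_tail]

def find_vowel_positions_py (word : String) : List (Int × Int) :=
  fvpA_go word.toList 0

-- ===== PORT B =====
-- the regex alternation ae|oe|au|eu (two-char alternatives, tried first)
def nucleusDiph (c d : Char) : Bool :=
  (c == 'a' && d == 'e') || (c == 'o' && d == 'e') || (c == 'a' && d == 'u') || (c == 'e' && d == 'u')

-- the one-char alternatives [aeiou]|Q
def nucleusSingle (c : Char) : Bool :=
  c == 'a' || c == 'e' || c == 'i' || c == 'o' || c == 'u' || c == 'Q'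

-- finditer's non-overlapping scan: at each position try the alternatives in order,
-- advance past the match (or by one on no match), emitting (start, end) spans.
def fvpB_go (l : List Char) (i : Int) : List (Int × Int) :=
  match l with
  | [] => []
  | [c] => if nucleusSingle c then [(i, i + 1)] else []
  | c :: d :: rest =>
    if nucleusDiph c d then (i, i + 2) :: fvpB_go rest (i + 2)
    else if nucleusSingle c then (i, i + 1) :: fvpB_go (d :: rest) (i + 1)
    else fvpB_go (d :: rest) (i + 1)

def find_vowel_positions_py_alt (word : String) : List (Int × Int) :=
  fvpB_go word.toList 0

-- ===== PRECONDITION & SPEC =====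
def Spec_find_vowel_positions_py (word : String) (out : List (Int × Int)) : Prop := out = find_vowel_positions_py_alt word
instance (word : String) (out : List (Int × Int)) : Decidable (Spec_find_vowel_positions_py word out) := by unfold Spec_find_vowel_positions_py; infer_instance

-- ===== CLAIM (what is proved, stated in full; the proofs are below) =====
def Claim_equal_find_vowel_positions_py : Prop := ∀ (word : String), Dom_find_vowel_positions_py word → Spec_find_vowel_positions_py word (find_vowel_positions_py word)

-- ===== LEMMAS AND PROOFS =====

lemma single_iff (c : Char) : (c ∈ pvVOWELS ∨ c = 'Q') ↔ nucleusSingle c = true := by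
  have h : pvVOWELS = ['a', 'e', 'i', 'o', 'u'] := rfl
  simp [h, nucleusSingle]
  tauto

lemma diph_iff (c d : Char) :
    (PySem.Chars.replace [c, d] ['Q'] ['q', 'u'] ∈ pvDIPHTHONGS) ↔ nucleusDiph c d = true := by
  by_cases hc : c = 'Q'
  · subst hc
    by_cases hd : d = 'Q'
    · subst hd; decide
    · have hd' : ¬ ('Q' = d) := fun h => hd h.symm
      simp [PySem.Chars.replace, PySem.Chars.replace.go, hd', pvDIPHTHONGS, nucleusDiph]
  · have hc' : ¬ ('Q' = c) := fun h => hc h.symm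
    by_cases hd : d = 'Q'
    · subst hd
      simp [PySem.Chars.replace, PySem.Chars.replace.go, hc', pvDIPHTHONGS, nucleusDiph]
    · have hd' : ¬ ('Q' = d) := fun h => hd h.symm
      simp [PySem.Chars.replace, PySem.Chars.replace.go, hc', hd', pvDIPHTHONGS, nucleusDiph]
      tauto

lemma diph_single {c d : Char} (h : nucleusDiph c d = true) : nucleusSingle c = true := by
  simp [nucleusDiph] at h
  simp [nucleusSingle]
  tauto

lemma go_eq : ∀ (n : Nat) (l : List Char) (i : Int), l.length ≤ n → fvpA_go l i = fvpB_go l i := by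
  intro n
  induction n with
  | zero =>
    intro l i h
    have hnil : l = [] := List.eq_nil_of_length_eq_zero (Nat.le_zero.mp h)
    subst hnil
    simp [fvpA_go, fvpB_go]
  | succ n ih =>
    intro l i h
    match l with
    | [] => simp [fvpA_go, fvpB_go]
    | [c] =>
      by_cases hs : nucleusSingle c = true <;>
        rw [fvpA_go, fvpB_go] <;>
        simp [hs, (single_iff c), fun j => ih [] j (by simp)] <;> rfl
    | c :: d :: rest =>
      have h' : rest.length + 2 ≤ n + 1 := by simpa using h
      by_cases hdp : nucleusDiph c d = true
      · have hs := diph_single hdp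
        have hcond : d :: rest ≠ [] ∧
            PySem.Chars.replace ((c :: d :: rest).take 2) ['Q'] ['q', 'u'] ∈ pvDIPHTHONGS :=
          ⟨List.cons_ne_nil d rest, by simpa using (diph_iff c d).mpr hdp⟩
        rw [fvpA_go, fvpB_go, if_pos ((single_iff c).mpr hs), if_pos hcond, if_pos hdp,
          List.tail_cons]
        exact congrArg _ (ih rest (i + 2) (by omega))
      · have hncond : ¬ (d :: rest ≠ [] ∧
            PySem.Chars.replace ((c :: d :: rest).take 2) ['Q'] ['q', 'u'] ∈ pvDIPHTHONGS) := by
          intro hx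
          exact hdp ((diph_iff c d).mp (by simpa using hx.2))
        by_cases hs : nucleusSingle c = true
        · rw [fvpA_go, fvpB_go, if_pos ((single_iff c).mpr hs), if_neg hncond, if_neg (by simp [hdp]),
            if_pos hs]
          exact congrArg _ (ih (d :: rest) (i + 1) (by simp; omega))
        · rw [fvpA_go, fvpB_go, if_neg (fun hx => hs ((single_iff c).mp hx)), if_neg (by simp [hdp]),
            if_neg hs]
          exact ih (d :: rest) (i + 1) (by simp; omega)

-- ===== VERDICT (by name: the statement is the Claim_ definition above) =====
theorem find_vowel_positions_py_spec : Claim_equal_find_vowel_positions_py := by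
  intro word _
  unfold Spec_find_vowel_positions_py find_vowel_positions_py find_vowel_positions_py_alt
  exact go_eq word.toList.length word.toList 0 le_rfl
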